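-- pv_equiv track=rewrite | github.com/Lucas-Boom/CS-2 | CS2 What's in a name.py | convert_lowercase
-- ===== SOURCE A (Python) =====
-- def convert_lowercase(name):                                #define function to convert name to lowercase
--     '''
--     Takes a name and converts it to lowercase
--     Args:
--         name(string): User's inputed name
--     Returns:
--         the name in all lowercase letters
--     '''
--     lowered_name = ""                                       #create empty string
--     for letter in name:                                     #for loop
--         num = ord(letter)                                   #convert letter to integer
--         if num > 64 and num < 91:                           #if number is greater than 64 and less than 91
--             num = num + 32                                  #add 32 to that integer
--             letter2 = chr(num)                              #convert integer back to lettre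
--             lowered_name = lowered_name + letter2           #add it to empty string
--         else:                                               #or else
--             lowered_name = lowered_name + letter            #add letter to lowered name
--     return lowered_name                                     #return lowered name
-- ===== SOURCE B (Python) =====
-- # Table-driven: one translation table built once over codepoints 65-90, applied with str.translate.
-- _LOWER_TABLE = str.maketrans({chr(c): chr(c + 32) for c in range(65, 91)})
--
--
-- def convert_lowercase(name):
--     '''
--     Takes a name and converts it to lowercase
--     Args:
--         name(string): User's inputed name
--     Returns:
--         the name in all lowercase letters
--     '''
--     return name.translate(_LOWER_TABLE)
-- ===== Notes on version B (the rewrite author's own statement) =====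
-- stated objective: idiomatic
-- what changed: Replaces the explicit per-character loop with if/else arithmetic and quadratic repeated string concatenation by a translation table over codepoints 65-90 built once with str.maketrans and applied in a single linear name.translate call.
import Mathlib
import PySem

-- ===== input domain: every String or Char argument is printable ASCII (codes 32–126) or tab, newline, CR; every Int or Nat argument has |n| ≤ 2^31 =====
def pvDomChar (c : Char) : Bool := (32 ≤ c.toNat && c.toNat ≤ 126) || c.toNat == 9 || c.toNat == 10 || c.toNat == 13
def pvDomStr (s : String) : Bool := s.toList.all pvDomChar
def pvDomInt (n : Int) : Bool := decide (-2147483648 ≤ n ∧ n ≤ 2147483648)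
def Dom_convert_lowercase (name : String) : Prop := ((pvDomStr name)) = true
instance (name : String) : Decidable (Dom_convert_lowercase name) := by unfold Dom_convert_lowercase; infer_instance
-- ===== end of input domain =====

-- B replaces A's per-character loop with arithmetic/if-else by a precomputed
-- translation table (codepoints 65..90 -> +32) applied in one pass (idiomatic).

-- ===== PORT A =====
-- literal port of A's loop: accumulate the output characters left to right
def convert_lowercase (name : String) : String :=
  String.ofList
    (name.toList.foldl
      (fun lowered_name letter =>
        let num := letter.toNat
        if 64 < num ∧ num < 91 then
          lowered_name ++ [Char.ofNat (num + 32)]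
        else
          lowered_name ++ [letter])
      [])

-- ===== PORT B =====
-- the translation table of Source B: {c: c+32 for c in range(65, 91)} (codepoints)
def pvLowerTable : PySem.Dict Int Int :=
  (PySem.List.pyRange 65 91 1).foldl (fun d c => d.insert c (c + 32)) PySem.Dict.empty

-- str.translate: each character is looked up by codepoint; unmapped characters pass through
def convert_lowercase_alt (name : String) : String :=
  String.ofList
    (name.toList.map (fun ch =>
      match pvLowerTable.get? (ch.toNat : Int) with
      | some v => Char.ofNat v.toNat
      | none => ch))

-- ===== PRECONDITION & SPEC =====
def Spec_convert_lowercase (name : String) (out : String) : Prop := out = convert_lowercase_alt name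
instance (name : String) (out : String) : Decidable (Spec_convert_lowercase name out) := by unfold Spec_convert_lowercase; infer_instance

-- ===== CLAIM (what is proved, stated in full; the proofs are below) =====
def Claim_equal_convert_lowercase : Prop := ∀ (name : String), Dom_convert_lowercase name → Spec_convert_lowercase name (convert_lowercase name)

-- ===== LEMMAS AND PROOFS =====

-- the fold over range(a, a+n) behaves as a pointwise conditional lookup
theorem pvTableFold_get (n : ℕ) (a : Int) (d : PySem.Dict Int Int) (i : Int) :
    ((PySem.List.pyRange a (a + n) 1).foldl (fun d c => d.insert c (c + 32)) d).get? i
      = if a ≤ i ∧ i < a + n then some (i + 32) else d.get? i := by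
  induction n generalizing d with
  | zero =>
      rw [PySem.List.pyRange_one_eq_nil (by omega)]
      simp only [List.foldl_nil]
      rw [if_neg (by omega)]
  | succ m ih =>
      have h : a + (m + 1 : ℕ) = (a + m) + 1 := by push_cast; ring
      rw [h, PySem.List.pyRange_one_succ_right (by omega), List.foldl_append]
      simp only [List.foldl_cons, List.foldl_nil]
      rw [PySem.Dict.get?_insert, ih]
      by_cases hi : i = a + m
      · rw [if_pos hi, if_pos (by omega), hi]
      · rw [if_neg hi]
        by_cases hlo : a ≤ i ∧ i < a + m
        · rw [if_pos hlo, if_pos (by omega)]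
        · rw [if_neg hlo, if_neg (by omega)]

theorem pvLowerTable_get (i : Int) :
    pvLowerTable.get? i = if 65 ≤ i ∧ i < 91 then some (i + 32) else none := by
  have h26 : (65 : Int) + (26 : ℕ) = 91 := by norm_num
  rw [pvLowerTable, ← h26, pvTableFold_get, PySem.Dict.get?_empty]

-- per-character agreement between A's branch and B's table lookup
theorem pvChar_eq (c : Char) :
    (if 64 < c.toNat ∧ c.toNat < 91 then Char.ofNat (c.toNat + 32) else c)
      = (match pvLowerTable.get? (c.toNat : Int) with
         | some v => Char.ofNat v.toNat
         | none => c) := by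
  rw [pvLowerTable_get]
  by_cases h : 64 < c.toNat ∧ c.toNat < 91
  · rw [if_pos h, if_pos (by omega)]
    have : ((c.toNat : Int) + 32).toNat = c.toNat + 32 := by omega
    simp [this]
  · rw [if_neg h, if_neg (by omega)]

-- ===== VERDICT (by name: the statement is the Claim_ definition above) =====
theorem convert_lowercase_spec : Claim_equal_convert_lowercase := by
  intro name _
  show convert_lowercase name = convert_lowercase_alt name
  unfold convert_lowercase convert_lowercase_alt
  congr 1
  have : ∀ (letter : Char) (acc : List Char),
      (fun lowered_name letter =>
        let num := letter.toNat
        if 64 < num ∧ num < 91 then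
          lowered_name ++ [Char.ofNat (num + 32)]
        else
          lowered_name ++ [letter]) acc letter
        = acc ++ [if 64 < letter.toNat ∧ letter.toNat < 91 then
            Char.ofNat (letter.toNat + 32) else letter] := by
    intro letter acc
    by_cases h : 64 < letter.toNat ∧ letter.toNat < 91 <;> simp [h]
  calc name.toList.foldl
        (fun lowered_name letter =>
          let num := letter.toNat
          if 64 < num ∧ num < 91 then
            lowered_name ++ [Char.ofNat (num + 32)]
          else
            lowered_name ++ [letter]) []
      = name.toList.foldl (fun acc letter => acc ++ [if 64 < letter.toNat ∧ letter.toNat < 91 then Char.ofNat (letter.toNat + 32) else letter]) [] := by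
        exact PySem.List.foldl_congr_mem _ _ _ _ (fun acc x _ => this x acc)
    _ = name.toList.map (fun letter => if 64 < letter.toNat ∧ letter.toNat < 91 then Char.ofNat (letter.toNat + 32) else letter) := by
        rw [PySem.List.foldl_append_singleton_eq_map]; simp
    _ = name.toList.map (fun ch =>
          match pvLowerTable.get? (ch.toNat : Int) with
          | some v => Char.ofNat v.toNat
          | none => ch) := List.map_congr_left (fun c _ => pvChar_eq c)
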